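-- pv_equiv track=rewrite | github.com/KishanMishra1/Python-Assignments | Assigment Set 4/Care Hospital.py | max_visited_speciality
-- ===== SOURCE A (Python) =====
-- def max_visited_speciality(patient_medical_speciality_list,medical_speciality):
--     # write your logic here
--     countp=counto=counte=0
--     for i in patient_medical_speciality_list:
--         if i=='P':
--             countp+=1
--
--         elif i=='O':
--             counto+=1
--         elif i=="E":
--             counte+=1
--         else:
--             pass
--     if counto<countp>counte:
--         return medical_speciality['P']
--     elif countp<counto>counte:
--         return medical_speciality['O']
--     elif countp<counte>counto:
--         return medical_speciality['E']
-- ===== SOURCE B (Python) =====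
-- def max_visited_speciality(patient_medical_speciality_list, medical_speciality):
--     counts = {k: patient_medical_speciality_list.count(k) for k in ('P', 'O', 'E')}
--     m = max(counts.values())
--     winners = [k for k, v in counts.items() if v == m]
--     if len(winners) == 1:
--         return medical_speciality[winners[0]]
--     return None
-- ===== Notes on version B (the rewrite author's own statement) =====
-- stated objective: simpler
-- what changed: Replaces the hand-rolled single-pass three-counter loop and the chain of strict pairwise comparisons with three list.count passes plus a max-then-uniqueness selection (unique winner looked up, otherwise None).
import Mathlib
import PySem

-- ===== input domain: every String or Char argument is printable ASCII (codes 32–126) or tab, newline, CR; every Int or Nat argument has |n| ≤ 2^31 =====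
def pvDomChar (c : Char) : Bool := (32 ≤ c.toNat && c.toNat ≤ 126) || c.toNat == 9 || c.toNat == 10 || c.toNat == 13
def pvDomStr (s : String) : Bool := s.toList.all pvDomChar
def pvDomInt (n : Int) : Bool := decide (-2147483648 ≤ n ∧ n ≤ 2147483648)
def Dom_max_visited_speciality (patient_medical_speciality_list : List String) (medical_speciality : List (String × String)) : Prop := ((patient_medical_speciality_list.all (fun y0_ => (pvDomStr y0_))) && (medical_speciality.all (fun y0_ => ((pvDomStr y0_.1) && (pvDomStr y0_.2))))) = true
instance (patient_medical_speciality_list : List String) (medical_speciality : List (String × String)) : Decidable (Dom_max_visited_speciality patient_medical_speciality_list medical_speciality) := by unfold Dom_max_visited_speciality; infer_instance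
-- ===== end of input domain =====

-- B replaces A's single-pass three-counter loop + strict pairwise-comparison chain by three
-- list.count passes and a max-then-uniqueness selection (objective: simpler decomposition).

-- ===== PORT A =====
def max_visited_speciality (patient_medical_speciality_list : List String) (medical_speciality : List (String × String)) : Option String :=
  let c := patient_medical_speciality_list.foldl
    (fun (c : Int × Int × Int) i =>
      if i == "P" then (c.1 + 1, c.2.1, c.2.2)
      else if i == "O" then (c.1, c.2.1 + 1, c.2.2)
      else if i == "E" then (c.1, c.2.1, c.2.2 + 1)
      else c) (0, 0, 0)
  -- counto<countp>counte  ==  counto<countp and countp>counte (Python chained comparison)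
  if c.2.1 < c.1 ∧ c.2.2 < c.1 then List.lookup "P" medical_speciality
  else if c.1 < c.2.1 ∧ c.2.2 < c.2.1 then List.lookup "O" medical_speciality
  else if c.1 < c.2.2 ∧ c.2.1 < c.2.2 then List.lookup "E" medical_speciality
  else none

-- ===== PORT B =====
def max_visited_speciality_alt (patient_medical_speciality_list : List String) (medical_speciality : List (String × String)) : Option String :=
  let counts : List (String × Int) :=
    (["P", "O", "E"] : List String).map (fun k => (k, (PySem.List.count patient_medical_speciality_list k : Int)))
  let m : Int := (PySem.List.max? (counts.map Prod.snd) (fun v => v)).getD 0   -- max(counts.values()); list is nonempty, getD never used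
  let winners : List String := (counts.filter (fun kv => kv.2 == m)).map Prod.fst
  if winners.length == 1 then List.lookup (winners.headD "") medical_speciality
  else none

-- ===== PRECONDITION & SPEC =====
-- Pre_ excludes exactly the inputs on which Python A RAISES (KeyError): those where one
-- category strictly wins the count but its key is absent from the medical_speciality dict.
def Pre_max_visited_speciality (patient_medical_speciality_list : List String) (medical_speciality : List (String × String)) : Prop :=
  let p := patient_medical_speciality_list.count "P"
  let o := patient_medical_speciality_list.count "O"
  let e := patient_medical_speciality_list.count "E"
  (o < p ∧ e < p → "P" ∈ medical_speciality.map Prod.fst) ∧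
  (p < o ∧ e < o → "O" ∈ medical_speciality.map Prod.fst) ∧
  (p < e ∧ o < e → "E" ∈ medical_speciality.map Prod.fst)
instance (patient_medical_speciality_list : List String) (medical_speciality : List (String × String)) : Decidable (Pre_max_visited_speciality patient_medical_speciality_list medical_speciality) := by unfold Pre_max_visited_speciality; infer_instance

def pvWitness_max_visited_speciality : List String × (List (String × String)) :=
  (["P", "P", "O"], [("P", "Cardiology"), ("O", "Ortho"), ("E", "ENT")])

def Spec_max_visited_speciality (patient_medical_speciality_list : List String) (medical_speciality : List (String × String)) (out : Option String) : Prop := out = max_visited_speciality_alt patient_medical_speciality_list medical_speciality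
instance (patient_medical_speciality_list : List String) (medical_speciality : List (String × String)) (out : Option String) : Decidable (Spec_max_visited_speciality patient_medical_speciality_list medical_speciality out) := by unfold Spec_max_visited_speciality; infer_instance

-- ===== CLAIM (what is proved, stated in full; the proofs are below) =====
def Claim_equal_max_visited_speciality : Prop := ∀ (patient_medical_speciality_list : List String) (medical_speciality : List (String × String)), Dom_max_visited_speciality patient_medical_speciality_list medical_speciality → Pre_max_visited_speciality patient_medical_speciality_list medical_speciality → Spec_max_visited_speciality patient_medical_speciality_list medical_speciality (max_visited_speciality patient_medical_speciality_list medical_speciality)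

-- ===== LEMMAS AND PROOFS =====

-- A's counting fold computes the three occurrence counts.
theorem pv_fold_counts (xs : List String) (a b c : Int) :
    xs.foldl
      (fun (c : Int × Int × Int) i =>
        if i == "P" then (c.1 + 1, c.2.1, c.2.2)
        else if i == "O" then (c.1, c.2.1 + 1, c.2.2)
        else if i == "E" then (c.1, c.2.1, c.2.2 + 1)
        else c) (a, b, c)
      = (a + xs.count "P", b + xs.count "O", c + xs.count "E") := by
  induction xs generalizing a b c with
  | nil => simp
  | cons x t ih =>
    simp only [List.foldl_cons, List.count_cons]
    by_cases hP : x = "P" <;> by_cases hO : x = "O" <;> by_cases hE : x = "E" <;>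
      simp_all <;> ring

-- The two decision structures agree for any three counts.
theorem pv_dec_eq (ms : List (String × String)) (p o e : Int) :
    (if o < p ∧ e < p then List.lookup "P" ms
     else if p < o ∧ e < o then List.lookup "O" ms
     else if p < e ∧ o < e then List.lookup "E" ms
     else none)
    =
    (let counts : List (String × Int) := [("P", p), ("O", o), ("E", e)]
     let m : Int := (PySem.List.max? (counts.map Prod.snd) (fun v => v)).getD 0
     let winners : List String := (counts.filter (fun kv => kv.2 == m)).map Prod.fst
     if winners.length == 1 then List.lookup (winners.headD "") ms
     else none) := by
  have hm : (PySem.List.max? ([p, o, e]) (fun v => v)).getD 0 = max (max p o) e := by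
    rw [PySem.List.max?_id_cons]
    simp [List.foldl]
  simp only [List.map, hm]
  by_cases h1 : o < p ∧ e < p
  · have e1 : max (max p o) e = p := by omega
    have f1 : (o == p) = false := beq_eq_false_iff_ne.mpr (by omega)
    have f2 : (e == p) = false := beq_eq_false_iff_ne.mpr (by omega)
    simp [e1, h1, List.filter, f1, f2]
  · by_cases h2 : p < o ∧ e < o
    · have e1 : max (max p o) e = o := by omega
      have f1 : (p == o) = false := beq_eq_false_iff_ne.mpr (by omega)
      have f2 : (e == o) = false := beq_eq_false_iff_ne.mpr (by omega)
      simp [e1, h1, h2, List.filter, f1, f2]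
    · by_cases h3 : p < e ∧ o < e
      · have e1 : max (max p o) e = e := by omega
        have f1 : (p == e) = false := beq_eq_false_iff_ne.mpr (by omega)
        have f2 : (o == e) = false := beq_eq_false_iff_ne.mpr (by omega)
        simp [e1, h1, h2, h3, List.filter, f1, f2]
      · -- no strict winner: at least two of p, o, e attain the max, so winners has length ≥ 2
        simp only [h1, h2, h3, if_false]
        have hub : p ≤ max (max p o) e ∧ o ≤ max (max p o) e ∧ e ≤ max (max p o) e := by omega
        generalize hM : max (max p o) e = M at hub ⊢
        obtain ⟨u1, u2, u3⟩ := hub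
        by_cases hp : p = M <;> by_cases ho : o = M <;> by_cases he : e = M
        all_goals first
        | omega
        | (simp [List.filter, beq_eq_decide, hp, ho, he])

-- ===== VERDICT (by name: the statement is the Claim_ definition above) =====
theorem max_visited_speciality_spec : Claim_equal_max_visited_speciality := by
  intro xs ms _ _
  unfold Spec_max_visited_speciality max_visited_speciality max_visited_speciality_alt
  simp only [pv_fold_counts, List.map, PySem.List.count_eq]
  have := pv_dec_eq ms (xs.count "P") (xs.count "O") (xs.count "E")
  simpa using this
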